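-- pv_equiv track=rewrite | github.com/Sapf3ar/finAId | rag/metrics.py | group_metrics
-- ===== SOURCE A (Python) =====
-- def group_metrics(short_metrics):
--     # Reverse the groups dictionary for lookup
--     groups = {
--         "Liquidity": ["CR", "QR", "CFO"],
--         "Leverage": ["D/E", "ICR", "DSCR"],
--         "Profitability": ["NPM", "EM", "GM", "RoE", "RoA", "ROIC"],
--         "Valuation": ["DY", "RevMult", "EV/EBITDA"],
--         "Risk-Adjusted Return": ["SR"],
--         "Growth": [
--             "RGR",
--             "EPSG",
--             "DGR",
--             "CapExG",
--             "SRevenueG",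
--             "FCFG",
--         ],  # Adding EPSG, DGR as example growth metrics
--     }
--     groups = {
--         "Liquidity": ["CR", "QR"],
--         "Leverage": ["D/E", "ICR", "DSCR"],
--         "Profitability": ["NPM", "EM", "GM", "RoE", "RoA", "ROIC"],
--         "Valuation": ["DY", "RevMult", "EV/EBITDA"],
--         "Growth": ["RGR"],
--         "Cash Flow": ["FCF", "CFO"],
--         "Risk-Adjusted Return": ["SR"],
--         "Efficiency": [
--             "ROIC",
--             "RoE",
--             "RoA",
--         ],  # ROIC added to efficiency since it measures capital utilization
--     }
--     grouped_metrics = {group: [] for group in groups}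
--
--     # Create a reverse lookup dictionary for metrics
--     metric_to_group = {}
--     for group_name, metric_keys in groups.items():
--         for metric_key in metric_keys:
--             metric_to_group[metric_key] = group_name
--
--     # Map each short metric to its corresponding group
--     for short_name in short_metrics:
--         group_name = metric_to_group.get(short_name, "Uncategorized")
--         if group_name in grouped_metrics:
--             grouped_metrics[group_name].append(short_name)
--         else:
--             grouped_metrics["Uncategorized"] = grouped_metrics.get(
--                 "Uncategorized", []
--             ) + [short_name]
--
--     return grouped_metrics
-- ===== SOURCE B (Python) =====
-- _GROUP_ORDER = ["Liquidity", "Leverage", "Profitability", "Valuation",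
--                 "Growth", "Cash Flow", "Risk-Adjusted Return", "Efficiency"]
--
-- # Flat metric -> group table (equal to A's last-win reverse map: RoE/RoA/ROIC -> Efficiency)
-- _METRIC_GROUP = {
--     "CR": "Liquidity", "QR": "Liquidity",
--     "D/E": "Leverage", "ICR": "Leverage", "DSCR": "Leverage",
--     "NPM": "Profitability", "EM": "Profitability", "GM": "Profitability",
--     "RoE": "Efficiency", "RoA": "Efficiency", "ROIC": "Efficiency",
--     "DY": "Valuation", "RevMult": "Valuation", "EV/EBITDA": "Valuation",
--     "RGR": "Growth", "FCF": "Cash Flow", "CFO": "Cash Flow",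
--     "SR": "Risk-Adjusted Return",
-- }
--
--
-- def group_metrics(short_metrics):
--     short_metrics = list(short_metrics)
--     result = {g: [m for m in short_metrics if _METRIC_GROUP.get(m) == g]
--               for g in _GROUP_ORDER}
--     leftover = [m for m in short_metrics if m not in _METRIC_GROUP]
--     if leftover:
--         result["Uncategorized"] = leftover
--     return result
-- ===== Notes on version B (the rewrite author's own statement) =====
-- stated objective: simpler
-- what changed: A builds a nested groups dict, derives a reverse map with a double loop, and fills a mutable result dict in one stateful pass with a special first-miss branch creating the Uncategorized key; B starts from a flat metric-to-group table literal (the last-win result of A's reverse map, so ROIC/RoE/RoA land in Efficiency), builds the result by one filter of the input per group via a dict comprehension, and attaches the independently computed leftover list last only if non-empty.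
import Mathlib
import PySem

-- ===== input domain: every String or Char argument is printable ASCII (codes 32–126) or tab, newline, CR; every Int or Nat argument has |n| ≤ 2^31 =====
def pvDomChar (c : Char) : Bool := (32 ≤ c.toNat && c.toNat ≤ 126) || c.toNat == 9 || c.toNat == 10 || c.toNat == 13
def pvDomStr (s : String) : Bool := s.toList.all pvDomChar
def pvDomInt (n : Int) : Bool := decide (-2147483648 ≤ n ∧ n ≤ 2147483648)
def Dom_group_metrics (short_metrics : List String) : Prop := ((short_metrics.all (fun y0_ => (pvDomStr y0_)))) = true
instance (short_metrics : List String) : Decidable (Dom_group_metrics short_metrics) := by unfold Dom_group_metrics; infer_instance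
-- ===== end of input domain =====

-- B replaces A's nested groups dict + reverse-map-building loop + single stateful pass (with a
-- special first-miss branch for "Uncategorized") by a flat metric→group table and one filter of
-- the input per group, plus a separately computed leftover list attached last; objective: simpler.

-- ===== PORT A =====
-- (A's first `groups` literal is immediately shadowed by the second assignment in the Python; only the second is live)
def pvGroupsA : PySem.Dict String (List String) :=
  PySem.Dict.ofList [("Liquidity", ["CR", "QR"]), ("Leverage", ["D/E", "ICR", "DSCR"]),
    ("Profitability", ["NPM", "EM", "GM", "RoE", "RoA", "ROIC"]),
    ("Valuation", ["DY", "RevMult", "EV/EBITDA"]),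
    ("Growth", ["RGR"]), ("Cash Flow", ["FCF", "CFO"]),
    ("Risk-Adjusted Return", ["SR"]),
    ("Efficiency", ["ROIC", "RoE", "RoA"])]

-- grouped_metrics = {group: [] for group in groups}
def pvBaseA : PySem.Dict String (List String) :=
  pvGroupsA.keys.foldl (fun d g => d.insert g ([] : List String)) PySem.Dict.empty

-- the reverse lookup loop
def pvM2GA : PySem.Dict String String :=
  pvGroupsA.items.foldl (fun d p => p.2.foldl (fun d mk => d.insert mk p.1) d) PySem.Dict.empty

def group_metrics (short_metrics : List String) : List (String × List String) :=
  (short_metrics.foldl (fun gm m =>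
      let g := pvM2GA.getD m "Uncategorized"
      if gm.contains g then gm.modify g [] (fun l => l ++ [m])
      else gm.insert "Uncategorized" (gm.getD "Uncategorized" [] ++ [m]))
    pvBaseA).items

-- ===== PORT B =====
def pvOrder : List String :=
  ["Liquidity", "Leverage", "Profitability", "Valuation",
   "Growth", "Cash Flow", "Risk-Adjusted Return", "Efficiency"]

def pvTable : PySem.Dict String String :=
  PySem.Dict.ofList [("CR", "Liquidity"), ("QR", "Liquidity"),
    ("D/E", "Leverage"), ("ICR", "Leverage"), ("DSCR", "Leverage"),
    ("NPM", "Profitability"), ("EM", "Profitability"), ("GM", "Profitability"),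
    ("RoE", "Efficiency"), ("RoA", "Efficiency"), ("ROIC", "Efficiency"),
    ("DY", "Valuation"), ("RevMult", "Valuation"), ("EV/EBITDA", "Valuation"),
    ("RGR", "Growth"), ("FCF", "Cash Flow"), ("CFO", "Cash Flow"),
    ("SR", "Risk-Adjusted Return")]

def group_metrics_alt (short_metrics : List String) : List (String × List String) :=
  -- result = {g: [m for m in short_metrics if _METRIC_GROUP.get(m) == g] for g in _GROUP_ORDER}
  let result := PySem.Dict.ofList
    (pvOrder.map (fun g => (g, short_metrics.filter (fun m => pvTable.get? m == some g))))
  let leftover := short_metrics.filter (fun m => !(pvTable.contains m))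
  (if leftover.isEmpty then result else result.insert "Uncategorized" leftover).items

-- ===== PRECONDITION & SPEC =====
def Spec_group_metrics (short_metrics : List String) (out : List (String × List String)) : Prop := out = group_metrics_alt short_metrics
instance (short_metrics : List String) (out : List (String × List String)) : Decidable (Spec_group_metrics short_metrics out) := by unfold Spec_group_metrics; infer_instance

-- ===== CLAIM (what is proved, stated in full; the proofs are below) =====
def Claim_equal_group_metrics : Prop := ∀ (short_metrics : List String), Dom_group_metrics short_metrics → Spec_group_metrics short_metrics (group_metrics short_metrics)

-- ===== LEMMAS AND PROOFS =====
-- == helpers for the proofs ==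
def pvK (m : String) : String := pvM2GA.getD m "Uncategorized"

def pvStepM (d : PySem.Dict String (List String)) (m : String) : PySem.Dict String (List String) :=
  d.modify (pvK m) [] (fun l => l ++ [m])

lemma pvTable_eq : pvTable = pvM2GA := by decide

lemma pvM2G_vals : ∀ p ∈ pvM2GA.items, p.2 ∈ pvGroupsA.keys ∧ p.2 ≠ "Uncategorized" := by decide

lemma pvK_spec (m : String) :
    (pvK m ∈ pvGroupsA.keys ∧ pvK m ≠ "Uncategorized" ∧ pvM2GA.contains m = true) ∨
    (pvK m = "Uncategorized" ∧ pvM2GA.contains m = false) := by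
  unfold pvK
  rcases h : pvM2GA.get? m with _ | g
  · right
    refine ⟨?_, ?_⟩
    · simp [PySem.Dict.getD_eq_get?_getD, h]
    · rw [PySem.Dict.contains_eq_isSome_get?, h]; rfl
  · left
    have hm : (m, g) ∈ pvM2GA.items := by
      exact PySem.Dict.mem_items_of_get?_eq_some pvM2GA h
    have hv := pvM2G_vals _ hm
    have hk : pvM2GA.getD m "Uncategorized" = g := by
      simp [PySem.Dict.getD_eq_get?_getD, h]
    refine ⟨?_, ?_, ?_⟩
    · rw [hk]; exact hv.1
    · rw [hk]; exact hv.2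
    · rw [PySem.Dict.contains_eq_isSome_get?, h]; rfl

lemma pvStepA_eq (d : PySem.Dict String (List String)) (m : String)
    (h : ∀ g ∈ pvGroupsA.keys, d.contains g = true) :
    (let g := pvM2GA.getD m "Uncategorized";
     if d.contains g then d.modify g [] (fun l => l ++ [m])
     else d.insert "Uncategorized" (d.getD "Uncategorized" [] ++ [m])) = pvStepM d m := by
  show (if d.contains (pvK m) then d.modify (pvK m) [] (fun l => l ++ [m])
        else d.insert "Uncategorized" (d.getD "Uncategorized" [] ++ [m])) = pvStepM d m
  rcases pvK_spec m with ⟨hmem, -, -⟩ | ⟨hU, -⟩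
  · rw [if_pos (h _ hmem)]; rfl
  · rw [hU]
    by_cases hc : d.contains "Uncategorized" = true
    · rw [if_pos hc]; unfold pvStepM; rw [hU]
    · rw [if_neg hc]
      unfold pvStepM
      rw [hU]
      rfl

lemma pvFoldA_eq (sm : List String) : ∀ d : PySem.Dict String (List String),
    (∀ g ∈ pvGroupsA.keys, d.contains g = true) →
    sm.foldl (fun gm m =>
      let g := pvM2GA.getD m "Uncategorized"
      if gm.contains g then gm.modify g [] (fun l => l ++ [m])
      else gm.insert "Uncategorized" (gm.getD "Uncategorized" [] ++ [m])) d
    = sm.foldl pvStepM d := by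
  induction sm with
  | nil => intro d _; rfl
  | cons m sm ih =>
    intro d h
    simp only [List.foldl_cons]
    rw [pvStepA_eq d m h]
    refine ih _ (fun g hg => ?_)
    unfold pvStepM
    rw [PySem.Dict.contains_modify]
    simp [h g hg]

lemma pvF_getD (sm : List String) (c : String) :
    (sm.foldl pvStepM pvBaseA).getD c [] = pvBaseA.getD c [] ++ sm.filter (fun m => pvK m == c) := by
  have h1 : sm.foldl pvStepM pvBaseA
      = (sm.map (fun m => (pvK m, m))).foldl (fun d p => d.modify p.1 [] (fun l => l ++ [p.2])) pvBaseA := by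
    rw [List.foldl_map]
    rfl
  rw [h1, PySem.Dict.getD_foldl_modify_append]
  congr 1
  rw [List.filter_map]
  simp [Function.comp_def]

lemma pvBase_getD (c : String) : pvBaseA.getD c [] = [] := by
  rcases h : pvBaseA.get? c with _ | v
  · simp [PySem.Dict.getD_eq_get?_getD, h]
  · have hm : (c, v) ∈ pvBaseA.items := PySem.Dict.mem_items_of_get?_eq_some pvBaseA h
    have hv : ∀ p ∈ pvBaseA.items, p.2 = ([] : List String) := by decide
    rw [PySem.Dict.getD_eq_get?_getD, h]
    exact hv _ hm

lemma pvF_keys (sm : List String) :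
    (sm.foldl pvStepM pvBaseA).keys = PySem.Set.update pvGroupsA.keys (sm.map pvK) := by
  have : pvBaseA.keys = pvGroupsA.keys := by decide
  rw [← this]
  exact PySem.Dict.keys_foldl_insert_key sm pvK (fun d x => d.getD (pvK x) [] ++ [x]) pvBaseA

lemma pvF_nodup (sm : List String) : (sm.foldl pvStepM pvBaseA).keys.Nodup := by
  exact PySem.Dict.nodup_keys_foldl_insert_key sm pvK (fun d x => d.getD (pvK x) [] ++ [x]) pvBaseA (by decide)

lemma pvUpd_id (xs : List String) : ∀ s : List String, (∀ x ∈ xs, x ∈ s) → PySem.Set.update s xs = s := by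
  induction xs with
  | nil => intro s _; rfl
  | cons x xs ih =>
    intro s h
    show PySem.Set.update (PySem.Set.add s x) xs = s
    have : PySem.Set.add s x = s := by
      simp [PySem.Set.add, h x (by simp)]
    rw [this]
    exact ih s (fun y hy => h y (by simp [hy]))

lemma pvUpd_G (xs : List String) (h : ∀ x ∈ xs, x ∈ pvGroupsA.keys ∨ x = "Uncategorized") :
    PySem.Set.update pvGroupsA.keys xs
    = if "Uncategorized" ∈ xs then pvGroupsA.keys ++ ["Uncategorized"] else pvGroupsA.keys := by
  induction xs with
  | nil => rw [if_neg (by simp)]; rfl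
  | cons x xs ih =>
    rcases h x (by simp) with hx | hx
    · have hxU : x ≠ "Uncategorized" := by
        intro hh; revert hx; rw [hh]; decide
      show PySem.Set.update (PySem.Set.add pvGroupsA.keys x) xs = _
      have : PySem.Set.add pvGroupsA.keys x = pvGroupsA.keys := by
        simp [PySem.Set.add, hx]
      rw [this, ih (fun y hy => h y (by simp [hy]))]
      simp [hxU.symm]
    · subst hx
      show PySem.Set.update (PySem.Set.add pvGroupsA.keys "Uncategorized") xs = _
      have : PySem.Set.add pvGroupsA.keys "Uncategorized" = pvGroupsA.keys ++ ["Uncategorized"] := by decide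
      rw [this, pvUpd_id xs _ ?hmem]
      · simp
      case hmem =>
        intro y hy
        rcases h y (by simp [hy]) with hyk | hyk
        · simp [hyk]
        · simp [hyk]

lemma pvU_not_mem : "Uncategorized" ∉ pvGroupsA.keys := by decide

lemma pvFilter_grp (sm : List String) (g : String) (hg : g ∈ pvGroupsA.keys) :
    sm.filter (fun m => pvK m == g) = sm.filter (fun m => pvM2GA.get? m == some g) := by
  refine List.filter_congr (fun m _ => ?_)
  rcases h : pvM2GA.get? m with _ | v
  · have hk : pvK m = "Uncategorized" := by
      simp [pvK, PySem.Dict.getD_eq_get?_getD, h]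
    have hgU : g ≠ "Uncategorized" := fun hh => pvU_not_mem (hh ▸ hg)
    rw [hk]
    simp [Ne.symm hgU]
  · have hk : pvK m = v := by
      simp [pvK, PySem.Dict.getD_eq_get?_getD, h]
    rw [hk]
    simp

lemma pvFilter_unc (sm : List String) :
    sm.filter (fun m => pvK m == "Uncategorized") = sm.filter (fun m => !(pvM2GA.contains m)) := by
  refine List.filter_congr (fun m _ => ?_)
  rcases pvK_spec m with ⟨-, hne, hc⟩ | ⟨hU, hc⟩
  · simp [hne, hc]
  · simp [hU, hc]

lemma pvK_mem_or (m : String) : pvK m ∈ pvGroupsA.keys ∨ pvK m = "Uncategorized" := by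
  rcases pvK_spec m with ⟨h, -, -⟩ | ⟨h, -⟩
  · exact Or.inl h
  · exact Or.inr h

lemma pvU_mem_iff (sm : List String) :
    ("Uncategorized" ∈ sm.map pvK) ↔ (sm.filter (fun m => !(pvM2GA.contains m)) ≠ []) := by
  rw [List.mem_map, Ne, List.filter_eq_nil_iff]
  constructor
  · rintro ⟨m, hm, hk⟩ hall
    rcases pvK_spec m with ⟨-, hne, -⟩ | ⟨-, hc⟩
    · exact hne hk
    · exact hall m hm (by simp [hc])
  · intro h
    simp only [not_forall, not_not, exists_prop] at h
    obtain ⟨m, hmem, hc⟩ := h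
    refine ⟨m, hmem, ?_⟩
    rcases pvK_spec m with ⟨-, -, hct⟩ | ⟨hU, -⟩
    · simp [hct] at hc
    · exact hU

lemma pvB_result_items (sm : List String) :
    (PySem.Dict.ofList
      (pvOrder.map (fun g => (g, sm.filter (fun m => pvTable.get? m == some g))))).items
    = pvOrder.map (fun g => (g, sm.filter (fun m => pvTable.get? m == some g))) := by
  have h0 : PySem.Dict.ofList
      (pvOrder.map (fun g => (g, sm.filter (fun m => pvTable.get? m == some g))))
      = pvOrder.foldl
          (fun d g => d.insert g (sm.filter (fun m => pvTable.get? m == some g)))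
          PySem.Dict.empty := by
    show (pvOrder.map (fun g => (g, sm.filter (fun m => pvTable.get? m == some g)))).foldl
        (fun d p => d.insert p.1 p.2) PySem.Dict.empty = _
    rw [List.foldl_map]
  rw [h0]
  have := PySem.Dict.items_foldl_insert_fresh (l := pvOrder)
    (d := (PySem.Dict.empty : PySem.Dict String (List String)))
    (k := fun g => g)
    (v := fun g => sm.filter (fun m => pvTable.get? m == some g))
    (by intro a _; simp) (by decide)
  simpa using this

lemma pvA_map_eq (sm : List String) :
    pvGroupsA.keys.map (fun c => (c, (sm.foldl pvStepM pvBaseA).getD c []))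
    = pvOrder.map (fun g => (g, sm.filter (fun m => pvTable.get? m == some g))) := by
  have hGB : pvGroupsA.keys = pvOrder := by decide
  rw [hGB]
  refine List.map_congr_left (fun g hg => ?_)
  have hfst : g ∈ pvGroupsA.keys := by rw [hGB]; exact hg
  rw [pvF_getD, pvBase_getD, List.nil_append, pvFilter_grp sm g hfst, pvTable_eq]

lemma pvOrder_ne : ∀ g ∈ pvOrder, g ≠ "Uncategorized" := by decide

lemma pvB_eq (sm : List String) : group_metrics_alt sm =
    (pvOrder.map (fun g => (g, sm.filter (fun m => pvTable.get? m == some g)))) ++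
    (if sm.filter (fun m => !(pvTable.contains m)) = [] then []
     else [("Uncategorized", sm.filter (fun m => !(pvTable.contains m)))]) := by
  unfold group_metrics_alt
  show (if (sm.filter (fun m => !(pvTable.contains m))).isEmpty = true
      then PySem.Dict.ofList (pvOrder.map (fun g => (g, sm.filter (fun m => pvTable.get? m == some g))))
      else (PySem.Dict.ofList (pvOrder.map (fun g => (g, sm.filter (fun m => pvTable.get? m == some g))))).insert "Uncategorized" (sm.filter (fun m => !(pvTable.contains m)))).items = _
  by_cases hc : sm.filter (fun m => !(pvTable.contains m)) = []
  · rw [if_pos hc, List.append_nil]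
    rw [if_pos (by simp [hc])]
    exact pvB_result_items sm
  · rw [if_neg hc]
    rw [if_neg (by simpa [List.isEmpty_iff] using hc)]
    have hnc : (PySem.Dict.ofList
        (pvOrder.map (fun g => (g, sm.filter (fun m => pvTable.get? m == some g))))).contains "Uncategorized" = false := by
      rw [PySem.Dict.contains_eq_decide_mem_keys]
      have hk : (PySem.Dict.ofList
          (pvOrder.map (fun g => (g, sm.filter (fun m => pvTable.get? m == some g))))).keys
          = (pvOrder.map (fun g => (g, sm.filter (fun m => pvTable.get? m == some g)))).map (·.1) := by
        show _ = _
        rw [← pvB_result_items sm]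
        rfl
      rw [hk]
      simp only [List.map_map, decide_eq_false_iff_not, List.mem_map]
      rintro ⟨g, hg, hg1⟩
      exact pvOrder_ne g hg hg1
    rw [PySem.Dict.items_insert_of_not_contains _ _ (h := hnc), pvB_result_items sm]

lemma pvMain (sm : List String) : group_metrics sm = group_metrics_alt sm := by
  unfold group_metrics
  rw [pvFoldA_eq sm pvBaseA (by decide)]
  rw [PySem.Dict.items_eq_map_keys _ (pvF_nodup sm) []]
  rw [pvF_keys]
  rw [pvUpd_G _ (fun x hx => by
    rcases List.mem_map.mp hx with ⟨m, -, rfl⟩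
    exact pvK_mem_or m)]
  rw [pvB_eq sm]
  by_cases hU : "Uncategorized" ∈ sm.map pvK
  · rw [if_pos hU]
    have hne : sm.filter (fun m => !(pvM2GA.contains m)) ≠ [] := (pvU_mem_iff sm).mp hU
    rw [if_neg (by rw [pvTable_eq]; exact hne)]
    rw [List.map_append]
    congr 1
    · exact pvA_map_eq sm
    · simp only [List.map_cons, List.map_nil]
      rw [pvF_getD, pvBase_getD, List.nil_append, pvFilter_unc, pvTable_eq]
  · rw [if_neg hU]
    have heq : sm.filter (fun m => !(pvM2GA.contains m)) = [] := by
      by_contra hne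
      exact hU ((pvU_mem_iff sm).mpr hne)
    rw [if_pos (by rw [pvTable_eq]; exact heq), List.append_nil]
    exact pvA_map_eq sm

-- ===== VERDICT (by name: the statement is the Claim_ definition above) =====
theorem group_metrics_spec : Claim_equal_group_metrics := by
  intro sm _
  show group_metrics sm = group_metrics_alt sm
  exact pvMain sm
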